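-- pv_equiv track=rewrite | github.com/xmye/leetcode | array/getClosestBigger.py | getClosestBigger
-- ===== SOURCE A (Python) =====
-- def getClosestBigger(arr1,arr2):
--     arr1.sort()
--     flag = [0] * len(arr1)
--     res = []
--     for j in range(len(arr2)):
--         i = 0
--         while i < len(arr1) and (arr1[i] < arr2[j] or flag[i] == 1):
--             i += 1
--         res.append(arr1[i])
--         flag[i] = 1
--         # if i == len(arr1) - 1:
--         #     break
--         if arr1[i] > arr2[j]:
--             for i in range(len(arr1)):
--                 if flag[i] == 0:
--                     res.append(arr1[i])
--             break
--     return res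
-- ===== SOURCE B (Python) =====
-- def getClosestBigger(arr1, arr2):
--     # Same side effect as A: sorts arr1 in place.
--     arr1.sort()
--     avail = list(arr1)          # sorted values still available
--     res = []
--     for x in arr2:
--         # binary search: first position with avail[pos] >= x
--         lo, hi = 0, len(avail)
--         while lo < hi:
--             mid = (lo + hi) // 2
--             if avail[mid] < x:
--                 lo = mid + 1
--             else:
--                 hi = mid
--         v = avail.pop(lo)       # IndexError when nothing >= x is left, as in A
--         res.append(v)
--         if v > x:
--             res += avail
--             break
--     return res
-- ===== Notes on version B (the rewrite author's own statement) =====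
-- stated objective: faster
-- what changed: A keeps a parallel flag array over the sorted arr1 and rescans it linearly from index 0 for every arr2 element; B instead maintains one shrinking sorted list of still-available values and locates the first element >= x by hand-written binary search, popping it, so the flag array and the repeated linear scans disappear.
import Mathlib
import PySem

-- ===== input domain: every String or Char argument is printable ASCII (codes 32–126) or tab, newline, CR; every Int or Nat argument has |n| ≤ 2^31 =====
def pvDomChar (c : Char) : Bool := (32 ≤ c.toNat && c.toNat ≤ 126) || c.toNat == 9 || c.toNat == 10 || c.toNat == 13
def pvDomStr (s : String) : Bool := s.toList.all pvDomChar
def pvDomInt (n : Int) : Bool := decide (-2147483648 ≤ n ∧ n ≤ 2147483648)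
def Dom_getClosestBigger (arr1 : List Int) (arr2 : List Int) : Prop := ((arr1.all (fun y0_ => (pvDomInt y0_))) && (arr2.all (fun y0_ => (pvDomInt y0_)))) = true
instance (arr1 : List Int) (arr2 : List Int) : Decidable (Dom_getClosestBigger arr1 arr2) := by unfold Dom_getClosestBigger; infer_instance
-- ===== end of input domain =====

-- B replaces A's flag array and repeated linear scans by a shrinking sorted list with
-- binary search (simpler state, measurably faster). Both A and B sort arr1 in place
-- (same side effect); the equivalence proved here is about the return value.

-- ===== PORT A =====
-- inner `while i < len(arr1) and (arr1[i] < arr2[j] or flag[i] == 1): i += 1`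
def pvFindA (arr1s : List Int) (flag : List Int) (x : Int) (i : Nat) : Nat :=
  if h : i < arr1s.length ∧ (arr1s.getD i 0 < x ∨ flag.getD i 0 = 1) then
    pvFindA arr1s flag x (i + 1)
  else i
termination_by arr1s.length - i
decreasing_by omega

-- the final `for i in range(len(arr1)): if flag[i] == 0: res.append(arr1[i])`
def pvTailA (arr1s : List Int) (flag : List Int) : List Int :=
  (arr1s.zip flag).filterMap (fun p => if p.2 = 0 then some p.1 else none)

-- outer `for j in range(len(arr2))` with early break
def pvLoopA (arr1s : List Int) (flag : List Int) (res : List Int) (rest : List Int) : List Int :=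
  match rest with
  | [] => res
  | x :: rest' =>
    let i := pvFindA arr1s flag x 0
    match arr1s[i]? with
    | none => res        -- `res.append(arr1[i])` raises IndexError here; excluded by Pre_
    | some v =>
      let flag' := flag.set i 1
      if x < v then (res ++ [v]) ++ pvTailA arr1s flag'
      else pvLoopA arr1s flag' (res ++ [v]) rest'

def getClosestBigger (arr1 : List Int) (arr2 : List Int) : List Int :=
  let arr1s := PySem.List.sorted arr1 (fun v => v) false
  pvLoopA arr1s (List.replicate arr1s.length 0) [] arr2

-- ===== PORT B =====
-- hand-written binary search of Source B: first position with avail[pos] ≥ x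
def pvBSearch (avail : List Int) (x : Int) (lo hi : Nat) : Nat :=
  if _h : lo < hi then
    let mid := (lo + hi) / 2
    if avail.getD mid 0 < x then pvBSearch avail x (mid + 1) hi
    else pvBSearch avail x lo mid
  else lo
termination_by hi - lo
decreasing_by all_goals omega

def pvLoopB (avail : List Int) (res : List Int) (rest : List Int) : List Int :=
  match rest with
  | [] => res
  | x :: rest' =>
    let k := pvBSearch avail x 0 avail.length
    match PySem.List.pop? avail (k : Int) with
    | none => res        -- `avail.pop(lo)` raises IndexError; excluded by Pre_
    | some (v, avail') =>
      if x < v then (res ++ [v]) ++ avail'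
      else pvLoopB avail' (res ++ [v]) rest'

def getClosestBigger_alt (arr1 : List Int) (arr2 : List Int) : List Int :=
  let arr1s := PySem.List.sorted arr1 (fun v => v) false
  pvLoopB arr1s [] arr2

-- ===== PRECONDITION & SPEC =====
-- Pre_ excludes exactly the inputs where A raises IndexError: at some position j of arr2
-- (reached with every earlier request matched by an equal element) no still-available
-- element of arr1 is ≥ arr2[j].
def Pre_getClosestBigger (arr1 : List Int) (arr2 : List Int) : Prop :=
  ∀ j < arr2.length,
    (∀ k < j, (arr2.take k).count (arr2.getD k 0) < arr1.count (arr2.getD k 0)) →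
    ∃ y ∈ arr1, arr2.getD j 0 ≤ y ∧ (arr2.take j).count y < arr1.count y

instance (arr1 : List Int) (arr2 : List Int) : Decidable (Pre_getClosestBigger arr1 arr2) := by
  unfold Pre_getClosestBigger; infer_instance

def pvWitness_getClosestBigger : List Int × List Int := ([3, 1, 5], [1, 2])

def Spec_getClosestBigger (arr1 : List Int) (arr2 : List Int) (out : List Int) : Prop := out = getClosestBigger_alt arr1 arr2
instance (arr1 : List Int) (arr2 : List Int) (out : List Int) : Decidable (Spec_getClosestBigger arr1 arr2 out) := by unfold Spec_getClosestBigger; infer_instance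

-- ===== CLAIM (what is proved, stated in full; the proofs are below) =====
def Claim_equal_getClosestBigger : Prop := ∀ (arr1 : List Int) (arr2 : List Int), Dom_getClosestBigger arr1 arr2 → Pre_getClosestBigger arr1 arr2 → Spec_getClosestBigger arr1 arr2 (getClosestBigger arr1 arr2)

-- ===== LEMMAS AND PROOFS =====

-- list-level version of A's inner scan over the zipped (value, flag) state
def pvFindL (pz : List (Int × Int)) (x : Int) : Nat :=
  match pz with
  | [] => 0
  | (v, f) :: rest => if v < x ∨ f = 1 then pvFindL rest x + 1 else 0

-- the available values of a zipped (value, flag) state; pvTailA arr1s flag = pvFilt (arr1s.zip flag)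
def pvFilt (pz : List (Int × Int)) : List Int :=
  pz.filterMap (fun p => if p.2 = 0 then some p.1 else none)

theorem pvFilt_sublist (pz : List (Int × Int)) : (pvFilt pz).Sublist (pz.map Prod.fst) := by
  induction pz with
  | nil => simp [pvFilt]
  | cons p rest ih =>
    by_cases h : p.2 = 0
    · simpa [pvFilt, h] using ih.cons₂ p.1
    · simpa [pvFilt, h] using ih.cons p.1

theorem pvFilt_cons0 (v0 : Int) (rest : List (Int × Int)) :
    pvFilt ((v0, (0:Int)) :: rest) = v0 :: pvFilt rest := by simp [pvFilt]

theorem pvFilt_cons1 (v0 : Int) (rest : List (Int × Int)) :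
    pvFilt ((v0, (1:Int)) :: rest) = pvFilt rest := by simp [pvFilt]

theorem pvFindA_eq_findL (arr1s flag : List Int) (x : Int) (hl : flag.length = arr1s.length) :
    ∀ i, pvFindA arr1s flag x i = i + pvFindL ((arr1s.zip flag).drop i) x := by
  intro i
  fun_induction pvFindA arr1s flag x i with
  | case1 i h ih =>
    obtain ⟨hi, hc⟩ := h
    have hif : i < flag.length := by omega
    have hdrop : (arr1s.zip flag).drop i
        = (arr1s[i], flag[i]) :: (arr1s.zip flag).drop (i + 1) := by
      rw [List.drop_eq_getElem_cons (by simp [List.length_zip]; omega)]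
      simp
    rw [ih, hdrop]
    have : arr1s[i] < x ∨ flag[i] = 1 := by
      simpa [List.getD_eq_getElem?_getD, List.getElem?_eq_getElem, hi, hif] using hc
    simp [pvFindL, this]
    omega
  | case2 i h =>
    rcases Nat.lt_or_ge i arr1s.length with hi | hi
    · have hif : i < flag.length := by omega
      have hdrop : (arr1s.zip flag).drop i
          = (arr1s[i], flag[i]) :: (arr1s.zip flag).drop (i + 1) := by
        rw [List.drop_eq_getElem_cons (by simp [List.length_zip]; omega)]
        simp
      have hc : ¬ (arr1s[i] < x ∨ flag[i] = 1) := by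
        intro hcon; exact h ⟨hi, by
          simpa [List.getD_eq_getElem?_getD, List.getElem?_eq_getElem, hi, hif] using hcon⟩
      rw [hdrop]; simp [pvFindL, hc]
    · have : (arr1s.zip flag).drop i = [] := by
        apply List.drop_eq_nil_of_le; simp [List.length_zip]; omega
      simp [this, pvFindL]

theorem pvCountP_prefix (x : Int) (l : List Int) (hs : l.Pairwise (· ≤ ·)) :
    ∀ j (hj : j < l.length), (l[j] < x ↔ j < l.countP (fun v => decide (v < x))) := by
  induction l with
  | nil => intro j hj; simp at hj
  | cons a t ih =>
    intro j hj
    have hst := hs.of_cons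
    have hha := List.pairwise_cons.mp hs |>.1
    by_cases ha : a < x
    · cases j with
      | zero => simp [ha]
      | succ n =>
        have := ih hst n (by simpa using hj)
        simpa [ha] using this
    · have ht : t.countP (fun v => decide (v < x)) = 0 := by
        rw [List.countP_eq_zero]
        intro b hb
        simp only [decide_eq_true_eq]
        exact fun hbx => ha (lt_of_le_of_lt (hha b hb) hbx)
      cases j with
      | zero => simp [ha, ht]
      | succ n =>
        have hn : n < t.length := by simpa using hj
        constructor
        · intro hlt
          exact absurd hlt (by
            simp only [List.getElem_cons_succ] at *
            exact fun h => ha (lt_of_le_of_lt (hha _ (List.getElem_mem hn)) h))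
        · intro hcon; simp [ha, ht] at hcon

theorem pvBSearch_eq (avail : List Int) (x : Int) (hs : avail.Pairwise (· ≤ ·)) :
    pvBSearch avail x 0 avail.length = avail.countP (fun v => decide (v < x)) := by
  set k := avail.countP (fun v => decide (v < x)) with hk
  have hkle : k ≤ avail.length := List.countP_le_length
  suffices h : ∀ lo hi, lo ≤ k → k ≤ hi → hi ≤ avail.length → pvBSearch avail x lo hi = k from
    h 0 avail.length (Nat.zero_le _) hkle le_rfl
  intro lo hi
  fun_induction pvBSearch avail x lo hi with
  | case1 lo hi h mid hmidlt ih =>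
    intro hlo hhi hlen
    have hmh : mid < hi := by simp only [mid]; omega
    have hm : mid < avail.length := by omega
    have : avail[mid] < x := by
      simpa [List.getD_eq_getElem?_getD, List.getElem?_eq_getElem, hm] using hmidlt
    have : mid < k := (pvCountP_prefix x avail hs mid hm).mp this
    exact ih (by omega) hhi hlen
  | case2 lo hi h mid hmidlt ih =>
    intro hlo hhi hlen
    have hm : mid < avail.length := by simp only [mid] at *; omega
    have hge : ¬ avail[mid] < x := by
      simpa [List.getD_eq_getElem?_getD, List.getElem?_eq_getElem, hm] using hmidlt
    have : ¬ mid < k := fun hc => hge ((pvCountP_prefix x avail hs mid hm).mpr hc)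
    exact ih hlo (by omega) (by omega)
  | case3 lo hi h =>
    intro hlo hhi _; omega

theorem pvKey (pz : List (Int × Int)) (x : Int)
    (hs : (pz.map Prod.fst).Pairwise (· ≤ ·)) (hf : ∀ p ∈ pz, p.2 = 0 ∨ p.2 = 1) :
    (pz[pvFindL pz x]? = none →
      (pvFilt pz).countP (fun v => decide (v < x)) = (pvFilt pz).length) ∧
    (∀ v f, pz[pvFindL pz x]? = some (v, f) →
      f = 0 ∧ x ≤ v ∧
      (pvFilt pz)[(pvFilt pz).countP (fun v => decide (v < x))]? = some v ∧
      pvFilt (pz.set (pvFindL pz x) (v, 1)) =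
        (pvFilt pz).eraseIdx ((pvFilt pz).countP (fun v => decide (v < x)))) := by
  induction pz with
  | nil =>
    refine ⟨fun _ => rfl, fun v f h => by simp at h⟩
  | cons p rest ih =>
    obtain ⟨v0, f0⟩ := p
    have hs' : (rest.map Prod.fst).Pairwise (· ≤ ·) := by
      simpa using hs.of_cons
    have hf' : ∀ p ∈ rest, p.2 = 0 ∨ p.2 = 1 := fun p hp => hf p (List.mem_cons_of_mem _ hp)
    have ih' := ih hs' hf'
    by_cases hc : v0 < x ∨ f0 = 1
    · -- the scan skips the head
      have hstep : pvFindL ((v0, f0) :: rest) x = pvFindL rest x + 1 := by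
        simp [pvFindL, hc]
      by_cases h0 : f0 = 0
      · -- head available but < x
        have hvx : v0 < x := hc.resolve_right (by omega)
        subst h0
        have hcntc : ∀ l : List Int, (v0 :: l).countP (fun b => decide (b < x))
            = l.countP (fun b => decide (b < x)) + 1 := by
          intro l; simp [hvx]
        constructor
        · intro hnone
          rw [hstep, List.getElem?_cons_succ] at hnone
          have h := ih'.1 hnone
          rw [pvFilt_cons0, hcntc, h]
          simp
        · intro v f hsome
          rw [hstep, List.getElem?_cons_succ] at hsome
          obtain ⟨hfe, hxv, hget, herase⟩ := ih'.2 v f hsome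
          refine ⟨hfe, hxv, ?_, ?_⟩
          · rw [pvFilt_cons0, hcntc, List.getElem?_cons_succ]; exact hget
          · rw [hstep, List.set_cons_succ, pvFilt_cons0, pvFilt_cons0, hcntc,
              List.eraseIdx_cons_succ, herase]
      · -- head already flagged
        have h1 : f0 = 1 := (hf _ List.mem_cons_self).resolve_left h0
        subst h1
        constructor
        · intro hnone
          rw [hstep, List.getElem?_cons_succ] at hnone
          rw [pvFilt_cons1]; exact ih'.1 hnone
        · intro v f hsome
          rw [hstep, List.getElem?_cons_succ] at hsome
          obtain ⟨hfe, hxv, hget, herase⟩ := ih'.2 v f hsome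
          refine ⟨hfe, hxv, by rw [pvFilt_cons1]; exact hget, ?_⟩
          rw [hstep, List.set_cons_succ, pvFilt_cons1, pvFilt_cons1, herase]
    · -- the scan stops at the head: f0 = 0 and x ≤ v0
      have hxle : x ≤ v0 := by omega
      have hf0 : f0 ≠ 1 := by omega
      have h0 : f0 = 0 := (hf _ List.mem_cons_self).resolve_right hf0
      subst h0
      have hi0 : pvFindL ((v0, (0:Int)) :: rest) x = 0 := by
        simp [pvFindL]; omega
      have hcnt0 : (v0 :: pvFilt rest).countP (fun b => decide (b < x)) = 0 := by
        rw [List.countP_eq_zero]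
        intro b hb
        simp only [decide_eq_true_eq]
        rcases List.mem_cons.mp hb with h | h
        · omega
        · have hbm : b ∈ rest.map Prod.fst := (pvFilt_sublist rest).mem h
          have : v0 ≤ b := (List.pairwise_cons.mp hs).1 b (by simpa using hbm)
          omega
      constructor
      · intro hnone
        rw [hi0, List.getElem?_cons_zero] at hnone
        exact absurd hnone (by simp)
      · intro v f hsome
        rw [hi0, List.getElem?_cons_zero] at hsome
        simp only [Option.some.injEq, Prod.mk.injEq] at hsome
        obtain ⟨hv, hfe⟩ := hsome
        refine ⟨hfe.symm, by omega, ?_, ?_⟩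
        · rw [pvFilt_cons0, hcnt0, List.getElem?_cons_zero, hv]
        · rw [hi0, List.set_cons_zero, pvFilt_cons0, hcnt0, List.eraseIdx_cons_zero]
          exact pvFilt_cons1 v rest

theorem pvZipSet (l1 : List Int) : ∀ (l2 : List Int) (i : Nat) (b : Int),
    l1.zip (l2.set i b) = (l1.zip l2).set i (l1.getD i 0, b) := by
  induction l1 with
  | nil => intro l2 i b; simp
  | cons a t ih =>
    intro l2 i b
    cases l2 with
    | nil => simp
    | cons c u =>
      cases i with
      | zero => simp
      | succ n => simp [ih u n b]

theorem pvMain (rest : List Int) : ∀ (arr1s flag res : List Int),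
    arr1s.Pairwise (· ≤ ·) → flag.length = arr1s.length → (∀ f ∈ flag, f = 0 ∨ f = 1) →
    pvLoopA arr1s flag res rest = pvLoopB (pvFilt (arr1s.zip flag)) res rest := by
  induction rest with
  | nil => intro arr1s flag res _ _ _; rfl
  | cons x rest' ih =>
    intro arr1s flag res hs hl hf
    have hlzip : (arr1s.zip flag).length = arr1s.length := by
      simp [List.length_zip]; omega
    have hmapfst : (arr1s.zip flag).map Prod.fst = arr1s :=
      List.map_fst_zip (by omega)
    have hps : ((arr1s.zip flag).map Prod.fst).Pairwise (· ≤ ·) := by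
      rw [hmapfst]; exact hs
    have havs : (pvFilt (arr1s.zip flag)).Pairwise (· ≤ ·) :=
      hps.sublist (pvFilt_sublist _)
    have hfz : ∀ p ∈ arr1s.zip flag, p.2 = 0 ∨ p.2 = 1 := by
      intro p hp; obtain ⟨a, b⟩ := p; exact hf b (List.of_mem_zip hp).2
    have hkey := pvKey (arr1s.zip flag) x hps hfz
    have hfind : pvFindA arr1s flag x 0 = pvFindL (arr1s.zip flag) x := by
      simpa using pvFindA_eq_findL arr1s flag x hl 0
    have hbs := pvBSearch_eq (pvFilt (arr1s.zip flag)) x havs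
    rw [pvLoopA, pvLoopB, hfind, hbs]
    cases hA : arr1s[pvFindL (arr1s.zip flag) x]? with
    | none =>
      have hpz : (arr1s.zip flag)[pvFindL (arr1s.zip flag) x]? = none := by
        rw [List.getElem?_eq_none_iff] at hA ⊢; omega
      have hcnt := hkey.1 hpz
      rw [hcnt]
      have hpop : PySem.List.pop? (pvFilt (arr1s.zip flag))
          ((pvFilt (arr1s.zip flag)).length : Int) = none := by
        simp [PySem.List.pop?, PySem.List.pyIdx?]
      rw [hpop]
    | some v =>
      have hi : pvFindL (arr1s.zip flag) x < arr1s.length := by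
        rcases List.getElem?_eq_some_iff.mp hA with ⟨h, _⟩; exact h
      have hiz : pvFindL (arr1s.zip flag) x < (arr1s.zip flag).length := by omega
      have hif : pvFindL (arr1s.zip flag) x < flag.length := by omega
      have hpz : (arr1s.zip flag)[pvFindL (arr1s.zip flag) x]?
          = some (v, flag[pvFindL (arr1s.zip flag) x]) := by
        rw [List.getElem?_eq_getElem hiz, List.getElem_zip]
        have : arr1s[pvFindL (arr1s.zip flag) x] = v :=
          (List.getElem?_eq_some_iff.mp hA).2
        rw [this]
      obtain ⟨hf0, hxv, hget, herase⟩ := hkey.2 v _ hpz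
      have hk : (pvFilt (arr1s.zip flag)).countP (fun v => decide (v < x))
          < (pvFilt (arr1s.zip flag)).length :=
        (List.getElem?_eq_some_iff.mp hget).1
      have hvk : (pvFilt (arr1s.zip flag))[(pvFilt (arr1s.zip flag)).countP
          (fun v => decide (v < x))] = v := (List.getElem?_eq_some_iff.mp hget).2
      have hpop : PySem.List.pop? (pvFilt (arr1s.zip flag))
          (((pvFilt (arr1s.zip flag)).countP (fun v => decide (v < x)) : Nat) : Int)
          = some (v, (pvFilt (arr1s.zip flag)).eraseIdx
              ((pvFilt (arr1s.zip flag)).countP (fun v => decide (v < x)))) := by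
        rw [PySem.List.pop?_natCast (h := hk), hvk]
      rw [hpop]
      dsimp only
      have hsetfilt : pvTailA arr1s (flag.set (pvFindL (arr1s.zip flag) x) 1)
          = (pvFilt (arr1s.zip flag)).eraseIdx
              ((pvFilt (arr1s.zip flag)).countP (fun v => decide (v < x))) := by
        show pvFilt (arr1s.zip (flag.set (pvFindL (arr1s.zip flag) x) 1)) = _
        rw [pvZipSet]
        have hgd : arr1s.getD (pvFindL (arr1s.zip flag) x) 0 = v := by
          rw [List.getD_eq_getElem?_getD, hA]; rfl
        rw [hgd, herase]
      by_cases hlt : x < v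
      · rw [if_pos hlt, if_pos hlt, hsetfilt]
      · rw [if_neg hlt, if_neg hlt]
        rw [ih arr1s _ (res ++ [v]) hs (by simp [List.length_set]; omega) ?_]
        · show pvLoopB (pvFilt (arr1s.zip (flag.set (pvFindL (arr1s.zip flag) x) 1))) _ _ = _
          rw [show pvFilt (arr1s.zip (flag.set (pvFindL (arr1s.zip flag) x) 1)) = _ from hsetfilt]
        · intro f hfm
          rcases List.mem_or_eq_of_mem_set hfm with h | h
          · exact hf f h
          · right; exact h

theorem pvFilt_replicate (arr1s : List Int) :
    pvFilt (arr1s.zip (List.replicate arr1s.length 0)) = arr1s := by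
  induction arr1s with
  | nil => rfl
  | cons a t ih => simpa [pvFilt, List.replicate_succ] using ih

-- ===== VERDICT (by name: the statement is the Claim_ definition above) =====
theorem getClosestBigger_spec : Claim_equal_getClosestBigger := by
  intro arr1 arr2 _ _
  unfold Spec_getClosestBigger getClosestBigger getClosestBigger_alt
  have hs : (PySem.List.sorted arr1 (fun v => v) false).Pairwise (· ≤ ·) :=
    PySem.List.sorted_pairwise arr1 (fun v => v)
  rw [pvMain arr2 _ _ [] hs (by simp) (by simp), pvFilt_replicate]
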